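-- pv_equiv track=rewrite | github.com/Yeonri/SSAFY_Daejeon_Algorithm | Yeonri/삼성기출/고대_문명_유적_탐사.py | chk_matrix
-- ===== SOURCE A (Python) =====
-- from collections import deque
--
-- DXY = [(1, 0), (-1, 0),(0, 1), (0, -1)]
--
-- def bfs(matrix, visited, i, j, flag):
--     s_x, s_y = (i, j)
--     queue = deque([(s_x, s_y)])
--
--     tmp_dir = set()
--     tmp_dir.add((s_x, s_y))
--     visited.add((s_x, s_y))
--
--     count = 1
--
--     while queue:
--         x, y = queue.popleft()
--
--         for dx, dy in DXY:
--             nx, ny = x + dx, y + dy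
--
--             if 0 <= nx < N and 0 <= ny < N and (nx, ny) not in visited and matrix[x][y] == matrix[nx][ny]:
--                 tmp_dir.add((nx, ny))
--                 visited.add((nx, ny))
--                 count += 1
--                 queue.append((nx, ny))
--
--     if count >= 3:
--         if flag:
--             for x, y in tmp_dir:
--                 matrix[x][y] = 0
--         return count
--     return 0
--
-- def chk_matrix(matrix, flag):
--
--     # 각 방문 좌표들을 vistied set에 저장
--     # 탐색을 전체 값에 대해 하지 않고, 회전한 값들에 대해서만 탐색을 하도록 만든다.
--     # 모든 방향에 대해서 탐색을 진행하도록 한다.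
--
--     # 탐색을 줄이기 위한 위의 방식에 대한 엣지 케이스
--     # 만약에 회전을 하지 않는 부분에 연결이 되어있는 케이스는 탐색을 하지 못한다.
--
--     # 따라서 모든 좌표를 탐색하도록 설정을 먼저 해본다.
--
--     visited = set()
--     result = 0
--
--     for i in range(N):
--         for j in range(N):
--             if (i, j) not in visited:
--                 result += bfs(matrix, visited, i, j, flag)
--
--     return result
--
-- N = 5 # 매트릭스 크기
-- ===== SOURCE B (Python) =====
-- # B: fixed-point saturation flood (no queue, no per-BFS bookkeeping): grow each
-- # component by repeated full sweeps over unvisited neighbours until saturated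
-- # (N*N sweeps always suffice). Like A, mutates `matrix` in place (clears
-- # components of size >= 3) when flag is set.
-- N = 5
--
-- def chk_matrix(matrix, flag):
--     visited = set()
--     result = 0
--     for i in range(N):
--         for j in range(N):
--             if (i, j) in visited:
--                 continue
--             comp = {(i, j)}
--             for _ in range(N * N):
--                 comp = comp | {
--                     (nx, ny)
--                     for (x, y) in comp
--                     for (nx, ny) in ((x + 1, y), (x - 1, y), (x, y + 1), (x, y - 1))
--                     if 0 <= nx < N and 0 <= ny < N and (nx, ny) not in visited
--                     and matrix[x][y] == matrix[nx][ny]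
--                 }
--             visited |= comp
--             if len(comp) >= 3:
--                 result += len(comp)
--                 if flag:
--                     for (x, y) in comp:
--                         matrix[x][y] = 0
--     return result
-- ===== Notes on version B (the rewrite author's own statement) =====
-- stated objective: alternative
-- what changed: Replaces the per-component deque-based BFS flood fill (with incremental visited/count bookkeeping and an inner direction loop per dequeued cell) by a fixed-point saturation: each component is grown by repeated whole-set neighbour sweeps (N*N sweeps always suffice on an N*N grid) and its size taken at the end.
import Mathlib
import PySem

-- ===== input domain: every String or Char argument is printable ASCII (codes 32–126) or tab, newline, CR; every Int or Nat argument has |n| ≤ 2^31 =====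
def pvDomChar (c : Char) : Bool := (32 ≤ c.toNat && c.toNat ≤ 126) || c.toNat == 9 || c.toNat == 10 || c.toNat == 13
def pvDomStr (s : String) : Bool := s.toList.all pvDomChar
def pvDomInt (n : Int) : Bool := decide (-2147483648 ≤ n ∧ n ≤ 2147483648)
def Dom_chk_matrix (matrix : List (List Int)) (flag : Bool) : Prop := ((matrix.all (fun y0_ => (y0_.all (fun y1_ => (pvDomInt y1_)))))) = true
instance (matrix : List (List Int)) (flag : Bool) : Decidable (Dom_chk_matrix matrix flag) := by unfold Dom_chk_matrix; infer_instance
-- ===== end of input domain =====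

-- B replaces A's queue-based BFS flood fill by fixed-point saturation sweeps; both mutate
-- `matrix` in Python (clearing components of size >= 3 when flag is set) — the equivalence
-- proved here is about the RETURN value (the Lean ports thread the matrix functionally).

-- ===== PORT A =====
-- matrix[x][y]; exact for the in-bounds indices the guarded code uses (Pre_ gives the shape)
def pvVal (m : List (List Int)) (x y : Int) : Int :=
  (PySem.List.pyGet? ((PySem.List.pyGet? m x).getD []) y).getD 0

def pvDXY : List (Int × Int) := [(1, 0), (-1, 0), (0, 1), (0, -1)]

-- matrix[x][y] = 0 (indices produced by the programs are always in 0..4)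
def pvClear (m : List (List Int)) (cells : List (Int × Int)) : List (List Int) :=
  cells.foldl (fun m c => m.modify c.1.toNat (fun row => row.set c.2.toNat 0)) m

-- state: (tmp_dir, visited, count, queue)
abbrev PVSt := PySem.Set (Int × Int) × PySem.Set (Int × Int) × Int × List (Int × Int)

-- one `dx, dy` iteration of the `for dx, dy in DXY:` body of A's while loop
def pvDirStep (m : List (List Int)) (x y : Int) (st : PVSt) (d : Int × Int) : PVSt :=
  let nx := x + d.1
  let ny := y + d.2
  if 0 ≤ nx ∧ nx < 5 ∧ 0 ≤ ny ∧ ny < 5 ∧ (nx, ny) ∉ st.2.1 ∧ pvVal m x y = pvVal m nx ny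
  then (PySem.Set.add st.1 (nx, ny), PySem.Set.add st.2.1 (nx, ny), st.2.2.1 + 1,
        st.2.2.2 ++ [(nx, ny)])
  else st

def pvBfsDirs (m : List (List Int)) (x y : Int) (st : PVSt) : PVSt :=
  pvDXY.foldl (pvDirStep m x y) st

def pvAllCells : List (Int × Int) :=
  [0, 1, 2, 3, 4].flatMap (fun x => [0, 1, 2, 3, 4].map (fun y => ((x : Int), (y : Int))))

-- termination measure for the while loop
def pvUnvis (vis : List (Int × Int)) : Nat := (pvAllCells.toFinset \ vis.toFinset).card

def pvMeasure (vis : List (Int × Int)) (q : List (Int × Int)) : Nat :=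
  2 * pvUnvis vis + q.length

theorem pv_mem_allCells (p : Int × Int) (h : 0 ≤ p.1 ∧ p.1 < 5 ∧ 0 ≤ p.2 ∧ p.2 < 5) :
    p ∈ pvAllCells := by
  obtain ⟨x, y⟩ := p
  simp only [pvAllCells, List.mem_flatMap, List.mem_map, List.mem_cons]
  simp only [Prod.mk.injEq]
  obtain ⟨h1, h2, h3, h4⟩ := h
  refine ⟨x, by omega, y, by omega, rfl, rfl⟩

theorem pvUnvis_add (vis : List (Int × Int)) (n : Int × Int) (hn : n ∈ pvAllCells)
    (hnv : n ∉ vis) : pvUnvis (PySem.Set.add vis n) + 1 = pvUnvis vis := by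
  rw [PySem.Set.add_of_not_mem hnv]
  unfold pvUnvis
  have : (vis ++ [n]).toFinset = insert n vis.toFinset := by
    ext a; simp
  rw [this, Finset.sdiff_insert, Finset.card_erase_of_mem (by simp [hn, hnv])]
  have hmem : n ∈ pvAllCells.toFinset \ vis.toFinset := by simp [hn, hnv]
  have : 0 < (pvAllCells.toFinset \ vis.toFinset).card := Finset.card_pos.mpr ⟨n, hmem⟩
  omega

theorem pvBfsDirs_fold_measure (m : List (List Int)) (x y : Int) (L : List (Int × Int)) :
    ∀ st : PVSt,
      pvMeasure (L.foldl (pvDirStep m x y) st).2.1 (L.foldl (pvDirStep m x y) st).2.2.2 ≤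
        pvMeasure st.2.1 st.2.2.2 := by
  induction L with
  | nil => intro st; simp
  | cons d L ih =>
    intro st
    simp only [List.foldl_cons]
    refine le_trans (ih _) ?_
    simp only [pvDirStep]
    split
    · rename_i hg
      obtain ⟨h1, h2, h3, h4, h5, _⟩ := hg
      have := pvUnvis_add st.2.1 (x + d.1, y + d.2) (pv_mem_allCells _ (by simp; omega)) h5
      simp only [pvMeasure, List.length_append, List.length_singleton]
      omega
    · exact le_refl _

theorem pvBfsDirs_measure (m : List (List Int)) (x y : Int) (st : PVSt) :
    pvMeasure (pvBfsDirs m x y st).2.1 (pvBfsDirs m x y st).2.2.2 ≤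
      pvMeasure st.2.1 st.2.2.2 := pvBfsDirs_fold_measure m x y pvDXY st

-- A's `while queue:` loop
def pvBfsLoop (m : List (List Int)) (tmp vis : PySem.Set (Int × Int)) (cnt : Int)
    (queue : List (Int × Int)) : PySem.Set (Int × Int) × PySem.Set (Int × Int) × Int :=
  match queue with
  | [] => (tmp, vis, cnt)
  | (x, y) :: rest =>
    let st := pvBfsDirs m x y (tmp, vis, cnt, rest)
    pvBfsLoop m st.1 st.2.1 st.2.2.1 st.2.2.2
termination_by pvMeasure vis queue
decreasing_by
  calc pvMeasure (pvBfsDirs m x y (tmp, vis, cnt, rest)).2.1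
        (pvBfsDirs m x y (tmp, vis, cnt, rest)).2.2.2
      ≤ pvMeasure vis rest := pvBfsDirs_measure m x y (tmp, vis, cnt, rest)
    _ < pvMeasure vis ((x, y) :: rest) := by simp [pvMeasure]

-- bfs(matrix, visited, i, j, flag) -> (matrix', visited', return value)
def pvBfs (m : List (List Int)) (visited : PySem.Set (Int × Int)) (i j : Int) (flag : Bool) :
    List (List Int) × PySem.Set (Int × Int) × Int :=
  let queue := [(i, j)]
  let tmp := PySem.Set.add PySem.Set.empty (i, j)
  let visited := PySem.Set.add visited (i, j)
  let r := pvBfsLoop m tmp visited 1 queue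
  if 3 ≤ r.2.2 then
    ((if flag then pvClear m r.1 else m), r.2.1, r.2.2)
  else (m, r.2.1, 0)

abbrev PVOut := List (List Int) × PySem.Set (Int × Int) × Int

-- body of `for j in range(N):`
def pvInnerA (flag : Bool) (i : Int) (st : PVOut) (j : Int) : PVOut :=
  if (i, j) ∈ st.2.1 then st
  else
    let r := pvBfs st.1 st.2.1 i j flag
    (r.1, r.2.1, st.2.2 + r.2.2)

def pvOuterA (flag : Bool) (st : PVOut) (i : Int) : PVOut :=
  (PySem.List.pyRange 0 5 1).foldl (pvInnerA flag i) st

def chk_matrix (matrix : List (List Int)) (flag : Bool) : Int :=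
  ((PySem.List.pyRange 0 5 1).foldl (pvOuterA flag) (matrix, PySem.Set.empty, (0 : Int))).2.2

-- ===== PORT B =====
def pvNbrs (x y : Int) : List (Int × Int) := [(x + 1, y), (x - 1, y), (x, y + 1), (x, y - 1)]

-- comp | { ... one saturation sweep ... }
def pvStep (m : List (List Int)) (visited comp : PySem.Set (Int × Int)) :
    PySem.Set (Int × Int) :=
  PySem.Set.union comp (comp.foldl (fun acc c =>
    (pvNbrs c.1 c.2).foldl (fun acc n =>
      if 0 ≤ n.1 ∧ n.1 < 5 ∧ 0 ≤ n.2 ∧ n.2 < 5 ∧ n ∉ visited ∧ pvVal m c.1 c.2 = pvVal m n.1 n.2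
      then PySem.Set.add acc n else acc) acc) PySem.Set.empty)

-- for _ in range(N*N): comp = comp | {...}
def pvSat (m : List (List Int)) (visited comp : PySem.Set (Int × Int)) :
    PySem.Set (Int × Int) :=
  (PySem.List.pyRange 0 25 1).foldl (fun c _ => pvStep m visited c) comp

-- body of `for j in range(N):`
def pvInnerB (flag : Bool) (i : Int) (st : PVOut) (j : Int) : PVOut :=
  if (i, j) ∈ st.2.1 then st
  else
    let comp := pvSat st.1 st.2.1 (PySem.Set.add PySem.Set.empty (i, j))
    let vis' := PySem.Set.union st.2.1 comp
    if 3 ≤ PySem.Set.len comp then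
      ((if flag then pvClear st.1 comp else st.1), vis', st.2.2 + PySem.Set.len comp)
    else (st.1, vis', st.2.2)

def pvOuterB (flag : Bool) (st : PVOut) (i : Int) : PVOut :=
  (PySem.List.pyRange 0 5 1).foldl (pvInnerB flag i) st

def chk_matrix_alt (matrix : List (List Int)) (flag : Bool) : Int :=
  ((PySem.List.pyRange 0 5 1).foldl (pvOuterB flag) (matrix, PySem.Set.empty, (0 : Int))).2.2

-- ===== PRECONDITION & SPEC =====
-- Pre_ = exactly the matrix shapes A returns on: A indexes rows/columns 0..4 of the global
-- 5x5 grid, so it raises IndexError unless there are >= 5 rows whose first 5 each have >= 5 entries.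
def Pre_chk_matrix (matrix : List (List Int)) (flag : Bool) : Prop :=
  5 ≤ matrix.length ∧ ∀ row ∈ matrix.take 5, 5 ≤ row.length
instance (matrix : List (List Int)) (flag : Bool) : Decidable (Pre_chk_matrix matrix flag) := by
  unfold Pre_chk_matrix; infer_instance

def pvWitness_chk_matrix : List (List Int) × Bool :=
  ([[1, 1, 1, 0, 2], [0, 1, 0, 0, 2], [0, 1, 2, 2, 2], [3, 3, 0, 1, 0], [3, 0, 0, 1, 0]], true)

def Spec_chk_matrix (matrix : List (List Int)) (flag : Bool) (out : Int) : Prop :=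
  out = chk_matrix_alt matrix flag
instance (matrix : List (List Int)) (flag : Bool) (out : Int) :
    Decidable (Spec_chk_matrix matrix flag out) := by unfold Spec_chk_matrix; infer_instance

-- ===== CLAIM (what is proved, stated in full; the proofs are below) =====
def Claim_equal_chk_matrix : Prop := ∀ (matrix : List (List Int)) (flag : Bool),
  Dom_chk_matrix matrix flag → Pre_chk_matrix matrix flag →
    Spec_chk_matrix matrix flag (chk_matrix matrix flag)

-- ===== LEMMAS AND PROOFS =====

def pvInGrid (p : Int × Int) : Prop := 0 ≤ p.1 ∧ p.1 < 5 ∧ 0 ≤ p.2 ∧ p.2 < 5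

-- the edge relation both programs explore: q is an unvisited in-grid neighbour of p with equal value
def PvRel (m : List (List Int)) (vis : List (Int × Int)) (p q : Int × Int) : Prop :=
  pvInGrid q ∧ q ∉ vis ∧
    ((q.1 = p.1 + 1 ∧ q.2 = p.2) ∨ (q.1 = p.1 - 1 ∧ q.2 = p.2) ∨
     (q.1 = p.1 ∧ q.2 = p.2 + 1) ∨ (q.1 = p.1 ∧ q.2 = p.2 - 1)) ∧
    pvVal m p.1 p.2 = pvVal m q.1 q.2

def PvReach (m : List (List Int)) (vis : List (Int × Int)) (c a : Int × Int) : Prop :=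
  Relation.ReflTransGen (PvRel m vis) c a

theorem pvReach_congr (m : List (List Int)) (v1 v2 : List (Int × Int))
    (h : ∀ a, a ∈ v1 ↔ a ∈ v2) (c a : Int × Int) :
    PvReach m v1 c a → PvReach m v2 c a := by
  refine Relation.ReflTransGen.mono ?_
  intro p q hpq
  obtain ⟨hg, hv, ho, he⟩ := hpq
  exact ⟨hg, fun hq => hv ((h q).mpr hq), ho, he⟩

-- ---- A side: the DXY fold ----
theorem pvDirsFold_spec (m : List (List Int)) (vis0 : List (Int × Int)) (x y : Int)
    (L : List (Int × Int)) (hL : ∀ d ∈ L, d ∈ pvDXY) :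
    ∀ tmp vis cnt q,
      (∀ a, a ∈ vis ↔ a ∈ vis0 ∨ a ∈ tmp) → tmp.Nodup → vis.Nodup →
      cnt = (tmp.length : Int) →
      ((∀ a ∈ tmp, a ∈ (L.foldl (pvDirStep m x y) (tmp, vis, cnt, q)).1) ∧
       (∀ a, a ∈ (L.foldl (pvDirStep m x y) (tmp, vis, cnt, q)).2.1 ↔
          a ∈ vis0 ∨ a ∈ (L.foldl (pvDirStep m x y) (tmp, vis, cnt, q)).1) ∧
       (L.foldl (pvDirStep m x y) (tmp, vis, cnt, q)).1.Nodup ∧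
       (L.foldl (pvDirStep m x y) (tmp, vis, cnt, q)).2.1.Nodup ∧
       (L.foldl (pvDirStep m x y) (tmp, vis, cnt, q)).2.2.1 =
          ((L.foldl (pvDirStep m x y) (tmp, vis, cnt, q)).1.length : Int) ∧
       (∀ a ∈ (L.foldl (pvDirStep m x y) (tmp, vis, cnt, q)).1,
          a ∈ tmp ∨ (PvRel m vis0 (x, y) a ∧ a ∈ (L.foldl (pvDirStep m x y) (tmp, vis, cnt, q)).2.2.2)) ∧
       (∀ a ∈ (L.foldl (pvDirStep m x y) (tmp, vis, cnt, q)).2.2.2,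
          a ∈ q ∨ a ∈ (L.foldl (pvDirStep m x y) (tmp, vis, cnt, q)).1) ∧
       (∃ ext, (L.foldl (pvDirStep m x y) (tmp, vis, cnt, q)).2.2.2 = q ++ ext) ∧
       (∀ p, PvRel m vis0 (x, y) p → (p.1 - x, p.2 - y) ∈ L →
          p ∈ (L.foldl (pvDirStep m x y) (tmp, vis, cnt, q)).1)) := by
  induction L with
  | nil =>
    intro tmp vis cnt q hvc hnt hnv hcnt
    refine ⟨fun a ha => ha, hvc, hnt, hnv, hcnt, fun a ha => Or.inl ha,
      fun a ha => Or.inl ha, ⟨[], by simp⟩, fun p _ hp => by simp at hp⟩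
  | cons d L ih =>
    intro tmp vis cnt q hvc hnt hnv hcnt
    have hdL : ∀ e ∈ L, e ∈ pvDXY := fun e he => hL e (List.mem_cons_of_mem d he)
    rw [List.foldl_cons]
    by_cases hg : 0 ≤ x + d.1 ∧ x + d.1 < 5 ∧ 0 ≤ y + d.2 ∧ y + d.2 < 5 ∧
        (x + d.1, y + d.2) ∉ vis ∧ pvVal m x y = pvVal m (x + d.1) (y + d.2)
    · have hst1 : pvDirStep m x y (tmp, vis, cnt, q) d =
          (PySem.Set.add tmp (x + d.1, y + d.2), PySem.Set.add vis (x + d.1, y + d.2),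
           cnt + 1, q ++ [(x + d.1, y + d.2)]) := by
        simp only [pvDirStep, if_pos hg]
      rw [hst1]
      obtain ⟨hb1, hb2, hb3, hb4, hb5, hb6⟩ := hg
      have hnvis0 : (x + d.1, y + d.2) ∉ vis0 := fun hm => hb5 ((hvc _).mpr (Or.inl hm))
      have hntmp : (x + d.1, y + d.2) ∉ tmp := fun hm => hb5 ((hvc _).mpr (Or.inr hm))
      have hrel : PvRel m vis0 (x, y) (x + d.1, y + d.2) := by
        refine ⟨⟨hb1, hb2, hb3, hb4⟩, hnvis0, ?_, hb6⟩
        have : d = ((1:Int), (0:Int)) ∨ d = ((-1:Int), (0:Int)) ∨ d = ((0:Int), (1:Int)) ∨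
            d = ((0:Int), (-1:Int)) := by
          have := hL d List.mem_cons_self
          simpa [pvDXY] using this
        rcases this with h | h | h | h <;> subst h <;> simp <;> omega
      have haddt : PySem.Set.add tmp (x + d.1, y + d.2) = tmp ++ [(x + d.1, y + d.2)] :=
        PySem.Set.add_of_not_mem hntmp
      obtain ⟨c1, c2, c3, c4, c5, c6, c7, c8, c9⟩ :=
        ih hdL (PySem.Set.add tmp (x + d.1, y + d.2)) (PySem.Set.add vis (x + d.1, y + d.2))
          (cnt + 1) (q ++ [(x + d.1, y + d.2)])
          (fun a => by
            rw [PySem.Set.mem_add, PySem.Set.mem_add, hvc a]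
            tauto)
          (PySem.Set.nodup_add _ _ hnt) (PySem.Set.nodup_add _ _ hnv)
          (by rw [haddt]; simp [hcnt])
      refine ⟨?_, c2, c3, c4, c5, ?_, ?_, ?_, ?_⟩
      · exact fun a ha => c1 a ((PySem.Set.mem_add _ _ _).mpr (Or.inl ha))
      · intro a ha
        rcases c6 a ha with h | h
        · rcases (PySem.Set.mem_add _ _ _).mp h with h' | h'
          · exact Or.inl h'
          · subst h'
            refine Or.inr ⟨hrel, ?_⟩
            obtain ⟨ext, hext⟩ := c8
            rw [hext]; simp
        · exact Or.inr h
      · intro a ha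
        rcases c7 a ha with h | h
        · rcases List.mem_append.mp h with h' | h'
          · exact Or.inl h'
          · simp at h'
            subst h'
            exact Or.inr (c1 _ ((PySem.Set.mem_add _ _ _).mpr (Or.inr rfl)))
        · exact Or.inr h
      · obtain ⟨ext, hext⟩ := c8
        exact ⟨(x + d.1, y + d.2) :: ext, by rw [hext]; simp⟩
      · rintro ⟨p1, p2⟩ hp hoff
        rcases List.mem_cons.mp hoff with h | h
        · rw [Prod.ext_iff] at h
          obtain ⟨h1, h2⟩ := h
          dsimp at h1 h2
          have hxy : ((x + d.1, y + d.2) : Int × Int) = (p1, p2) := by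
            rw [Prod.ext_iff]; constructor <;> dsimp <;> omega
          rw [← hxy]
          exact c1 _ ((PySem.Set.mem_add _ _ _).mpr (Or.inr rfl))
        · exact c9 _ hp h
    · have hst1 : pvDirStep m x y (tmp, vis, cnt, q) d = (tmp, vis, cnt, q) := by
        simp only [pvDirStep, if_neg hg]
      rw [hst1]
      obtain ⟨c1, c2, c3, c4, c5, c6, c7, c8, c9⟩ := ih hdL tmp vis cnt q hvc hnt hnv hcnt
      refine ⟨c1, c2, c3, c4, c5, c6, c7, c8, ?_⟩
      rintro ⟨p1, p2⟩ hp hoff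
      rcases List.mem_cons.mp hoff with h | h
      · obtain ⟨hgrd, hnv0, _, hval⟩ := hp
        simp only [pvInGrid] at hgrd
        rw [Prod.ext_iff] at h
        obtain ⟨h1, h2⟩ := h
        dsimp at h1 h2 hgrd hnv0 hval
        have hx : x + d.1 = p1 := by omega
        have hy : y + d.2 = p2 := by omega
        have hpin : ((p1, p2) : Int × Int) ∈ vis := by
          by_contra hnotin
          refine hg ⟨by omega, by omega, by omega, by omega, ?_, ?_⟩
          · rw [hx, hy]; exact hnotin
          · rw [hx, hy]; exact hval
        rcases (hvc _).mp hpin with h' | h'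
        · exact absurd h' hnv0
        · exact c1 _ h'
      · exact c9 _ hp h

-- ---- A side: the while loop computes the reachable set ----
theorem pvBfsLoop_spec (m : List (List Int)) (vis0 : List (Int × Int)) (c : Int × Int) :
    ∀ n queue tmp vis cnt, pvMeasure vis queue = n →
      c ∈ tmp →
      (∀ a ∈ queue, a ∈ tmp) →
      (∀ a, a ∈ vis ↔ a ∈ vis0 ∨ a ∈ tmp) →
      (∀ a ∈ tmp, PvReach m vis0 c a) →
      (∀ a ∈ tmp, a ∉ queue → ∀ p, PvRel m vis0 a p → p ∈ tmp) →
      tmp.Nodup → vis.Nodup → cnt = (tmp.length : Int) →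
      ((∀ a, a ∈ (pvBfsLoop m tmp vis cnt queue).1 ↔ PvReach m vis0 c a) ∧
       (∀ a, a ∈ (pvBfsLoop m tmp vis cnt queue).2.1 ↔
          a ∈ vis0 ∨ a ∈ (pvBfsLoop m tmp vis cnt queue).1) ∧
       (pvBfsLoop m tmp vis cnt queue).1.Nodup ∧
       (pvBfsLoop m tmp vis cnt queue).2.1.Nodup ∧
       (pvBfsLoop m tmp vis cnt queue).2.2 = ((pvBfsLoop m tmp vis cnt queue).1.length : Int)) := by
  intro n
  induction n using Nat.strong_induction_on with
  | _ n ih =>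
    intro queue tmp vis cnt hn hc hq hvc hreach hclosed hnt hnv hcnt
    cases queue with
    | nil =>
      rw [pvBfsLoop]
      refine ⟨fun a => ⟨fun ha => hreach a ha, fun ha => ?_⟩, hvc, hnt, hnv, hcnt⟩
      induction ha with
      | refl => exact hc
      | tail hr hrel ihr => exact hclosed _ ihr (by simp) _ hrel
    | cons hd rest =>
      obtain ⟨x, y⟩ := hd
      obtain ⟨c1, c2, c3, c4, c5, c6, c7, c8, c9⟩ :=
        pvDirsFold_spec m vis0 x y pvDXY (fun d hd => hd) tmp vis cnt rest hvc hnt hnv hcnt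
      have hxyt : (x, y) ∈ tmp := hq _ List.mem_cons_self
      have hrest : ∀ a ∈ rest, a ∈ tmp := fun a ha => hq _ (List.mem_cons_of_mem _ ha)
      have hmeas : pvMeasure (pvBfsDirs m x y (tmp, vis, cnt, rest)).2.1
          (pvBfsDirs m x y (tmp, vis, cnt, rest)).2.2.2 < n := by
        have h1 := pvBfsDirs_measure m x y (tmp, vis, cnt, rest)
        dsimp only at h1
        have h2 : pvMeasure vis ((x, y) :: rest) = pvMeasure vis rest + 1 := by
          simp only [pvMeasure, List.length_cons]; omega
        omega
      rw [pvBfsLoop]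
      show ((∀ a, a ∈ (pvBfsLoop m (pvBfsDirs m x y (tmp, vis, cnt, rest)).1
          (pvBfsDirs m x y (tmp, vis, cnt, rest)).2.1
          (pvBfsDirs m x y (tmp, vis, cnt, rest)).2.2.1
          (pvBfsDirs m x y (tmp, vis, cnt, rest)).2.2.2).1 ↔ PvReach m vis0 c a) ∧ _)
      have hfold : pvBfsDirs m x y (tmp, vis, cnt, rest) =
          pvDXY.foldl (pvDirStep m x y) (tmp, vis, cnt, rest) := rfl
      rw [hfold] at *
      refine ih _ hmeas _ _ _ _ rfl (c1 _ hc) ?_ c2 ?_ ?_ c3 c4 c5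
      · intro a ha
        rcases c7 a ha with h | h
        · exact c1 _ (hrest _ h)
        · exact h
      · intro a ha
        rcases c6 a ha with h | ⟨hrel, _⟩
        · exact hreach _ h
        · exact Relation.ReflTransGen.tail (hreach _ hxyt) hrel
      · intro a ha hnq p hp
        rcases c6 a ha with h | ⟨hrel, hq'⟩
        · by_cases hxy : a = (x, y)
          · subst hxy
            refine c9 p hp ?_
            obtain ⟨_, _, ho, _⟩ := hp
            dsimp at ho
            obtain ⟨p1, p2⟩ := p
            dsimp at ho ⊢
            simp only [pvDXY, List.mem_cons, Prod.ext_iff]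
            rcases ho with ⟨h1, h2⟩ | ⟨h1, h2⟩ | ⟨h1, h2⟩ | ⟨h1, h2⟩ <;> simp <;> omega
          · have hnrest : a ∉ rest := by
              obtain ⟨ext, hext⟩ := c8
              rw [hext] at hnq
              exact fun hr => hnq (List.mem_append.mpr (Or.inl hr))
            exact c1 _ (hclosed a h (by simp [hxy, hnrest]) p hp)
        · exact absurd hq' hnq

-- ---- B side: one sweep adds exactly the PvRel-successors ----
theorem pvInnerFold_mem (m : List (List Int)) (vis : List (Int × Int)) (x y : Int)
    (L : List (Int × Int)) :
    ∀ (acc : PySem.Set (Int × Int)) (a : Int × Int),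
      a ∈ L.foldl (fun acc n =>
        if 0 ≤ n.1 ∧ n.1 < 5 ∧ 0 ≤ n.2 ∧ n.2 < 5 ∧ n ∉ vis ∧ pvVal m x y = pvVal m n.1 n.2
        then PySem.Set.add acc n else acc) acc ↔
      a ∈ acc ∨ ∃ n ∈ L, (0 ≤ n.1 ∧ n.1 < 5 ∧ 0 ≤ n.2 ∧ n.2 < 5 ∧ n ∉ vis ∧
        pvVal m x y = pvVal m n.1 n.2) ∧ a = n := by
  induction L with
  | nil => intro acc a; simp
  | cons d L ih =>
    intro acc a
    rw [List.foldl_cons]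
    by_cases hg : 0 ≤ d.1 ∧ d.1 < 5 ∧ 0 ≤ d.2 ∧ d.2 < 5 ∧ d ∉ vis ∧
        pvVal m x y = pvVal m d.1 d.2
    · rw [if_pos hg, ih]
      rw [PySem.Set.mem_add _ _ _]
      constructor
      · rintro ((h | h) | ⟨n, hn, hgn, rfl⟩)
        · exact Or.inl h
        · exact Or.inr ⟨d, List.mem_cons_self, hg, h⟩
        · exact Or.inr ⟨_, List.mem_cons_of_mem _ hn, hgn, rfl⟩
      · rintro (h | ⟨n, hn, hgn, rfl⟩)
        · exact Or.inl (Or.inl h)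
        · rcases List.mem_cons.mp hn with rfl | hn'
          · exact Or.inl (Or.inr rfl)
          · exact Or.inr ⟨_, hn', hgn, rfl⟩
    · rw [if_neg hg, ih]
      constructor
      · rintro (h | ⟨n, hn, hgn, rfl⟩)
        · exact Or.inl h
        · exact Or.inr ⟨_, List.mem_cons_of_mem _ hn, hgn, rfl⟩
      · rintro (h | ⟨n, hn, hgn, rfl⟩)
        · exact Or.inl h
        · rcases List.mem_cons.mp hn with rfl | hn'
          · exact absurd hgn hg
          · exact Or.inr ⟨_, hn', hgn, rfl⟩

theorem pvNbr_iff (m : List (List Int)) (vis : List (Int × Int)) (p a : Int × Int) :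
    (∃ n ∈ pvNbrs p.1 p.2, (0 ≤ n.1 ∧ n.1 < 5 ∧ 0 ≤ n.2 ∧ n.2 < 5 ∧ n ∉ vis ∧
        pvVal m p.1 p.2 = pvVal m n.1 n.2) ∧ a = n) ↔ PvRel m vis p a := by
  constructor
  · rintro ⟨n, hn, ⟨h1, h2, h3, h4, h5, h6⟩, rfl⟩
    refine ⟨⟨h1, h2, h3, h4⟩, h5, ?_, h6⟩
    simp only [pvNbrs, List.mem_cons, List.not_mem_nil, or_false] at hn
    rcases hn with rfl | rfl | rfl | rfl
    · exact Or.inl ⟨rfl, rfl⟩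
    · exact Or.inr (Or.inl ⟨rfl, rfl⟩)
    · exact Or.inr (Or.inr (Or.inl ⟨rfl, rfl⟩))
    · exact Or.inr (Or.inr (Or.inr ⟨rfl, rfl⟩))
  · rintro ⟨⟨h1, h2, h3, h4⟩, h5, ho, h6⟩
    refine ⟨a, ?_, ⟨h1, h2, h3, h4, h5, h6⟩, rfl⟩
    obtain ⟨a1, a2⟩ := a
    simp only [pvNbrs, List.mem_cons, List.not_mem_nil, or_false, Prod.mk.injEq]
    dsimp at ho
    rcases ho with ⟨hx, hy⟩ | ⟨hx, hy⟩ | ⟨hx, hy⟩ | ⟨hx, hy⟩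
    · exact Or.inl ⟨hx, hy⟩
    · exact Or.inr (Or.inl ⟨hx, hy⟩)
    · exact Or.inr (Or.inr (Or.inl ⟨hx, hy⟩))
    · exact Or.inr (Or.inr (Or.inr ⟨hx, hy⟩))

theorem pvOuterFold_mem (m : List (List Int)) (vis : List (Int × Int))
    (C : List (Int × Int)) :
    ∀ (acc : PySem.Set (Int × Int)) (a : Int × Int),
      a ∈ C.foldl (fun acc c =>
        (pvNbrs c.1 c.2).foldl (fun acc n =>
          if 0 ≤ n.1 ∧ n.1 < 5 ∧ 0 ≤ n.2 ∧ n.2 < 5 ∧ n ∉ vis ∧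
              pvVal m c.1 c.2 = pvVal m n.1 n.2
          then PySem.Set.add acc n else acc) acc) acc ↔
      a ∈ acc ∨ ∃ p ∈ C, PvRel m vis p a := by
  induction C with
  | nil => intro acc a; simp
  | cons c C ih =>
    intro acc a
    rw [List.foldl_cons, ih]
    rw [pvInnerFold_mem m vis c.1 c.2 (pvNbrs c.1 c.2) acc a]
    constructor
    · rintro ((h | h) | ⟨p, hp, hrel⟩)
      · exact Or.inl h
      · exact Or.inr ⟨c, List.mem_cons_self, (pvNbr_iff m vis c a).mp h⟩
      · exact Or.inr ⟨p, List.mem_cons_of_mem _ hp, hrel⟩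
    · rintro (h | ⟨p, hp, hrel⟩)
      · exact Or.inl (Or.inl h)
      · rcases List.mem_cons.mp hp with rfl | hp'
        · exact Or.inl (Or.inr ((pvNbr_iff m vis p a).mpr hrel))
        · exact Or.inr ⟨p, hp', hrel⟩

theorem pvStep_mem (m : List (List Int)) (vis comp : PySem.Set (Int × Int)) (a : Int × Int) :
    a ∈ pvStep m vis comp ↔ a ∈ comp ∨ ∃ p ∈ comp, PvRel m vis p a := by
  unfold pvStep
  rw [PySem.Set.mem_union]
  rw [pvOuterFold_mem m vis comp PySem.Set.empty a]
  simp [PySem.Set.empty]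

theorem pvStep_nodup (m : List (List Int)) (vis comp : PySem.Set (Int × Int))
    (h : comp.Nodup) : (pvStep m vis comp).Nodup := by
  unfold pvStep
  exact PySem.Set.nodup_union _ _ h

theorem pvFoldl_const_iterate {α β : Type} (L : List β) (f : α → α) :
    ∀ s, L.foldl (fun c _ => f c) s = f^[L.length] s := by
  induction L with
  | nil => intro s; simp
  | cons b L ih =>
    intro s
    rw [List.foldl_cons, ih, List.length_cons, Function.iterate_succ_apply]

-- ---- B side: 25 sweeps saturate to the reachable set ----
theorem pvSat_spec (m : List (List Int)) (vis : List (Int × Int)) (c : Int × Int)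
    (hc : pvInGrid c) :
    ((∀ a, a ∈ pvSat m vis (PySem.Set.add PySem.Set.empty c) ↔ PvReach m vis c a) ∧
     (pvSat m vis (PySem.Set.add PySem.Set.empty c)).Nodup) := by
  have hiter : pvSat m vis (PySem.Set.add PySem.Set.empty c) =
      (pvStep m vis)^[25] (PySem.Set.add PySem.Set.empty c) := by
    unfold pvSat
    rw [pvFoldl_const_iterate]
    have hl : (PySem.List.pyRange 0 25 1).length = 25 := by decide
    rw [hl]
  set T : Nat → PySem.Set (Int × Int) :=
    fun k => (pvStep m vis)^[k] (PySem.Set.add PySem.Set.empty c) with hT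
  have hT0 : T 0 = [c] := by
    show PySem.Set.add PySem.Set.empty c = [c]
    rw [PySem.Set.add_of_not_mem (by simp [PySem.Set.empty])]
    simp [PySem.Set.empty]
  have hTs : ∀ k, T (k + 1) = pvStep m vis (T k) :=
    fun k => Function.iterate_succ_apply' _ _ _
  have hprops : ∀ k, (T k).Nodup ∧ (∀ a ∈ T k, pvInGrid a ∧ PvReach m vis c a) ∧ c ∈ T k := by
    intro k
    induction k with
    | zero => rw [hT0]; exact ⟨List.nodup_singleton c, by
        rintro a ha
        rcases List.mem_singleton.mp ha with rfl
        exact ⟨hc, Relation.ReflTransGen.refl⟩, List.mem_singleton.mpr rfl⟩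
    | succ k ihk =>
      obtain ⟨hnd, hga, hcm⟩ := ihk
      rw [hTs]
      refine ⟨pvStep_nodup m vis _ hnd, ?_, (pvStep_mem m vis _ _).mpr (Or.inl hcm)⟩
      intro a ha
      rcases (pvStep_mem m vis _ _).mp ha with h | ⟨p, hp, hrel⟩
      · exact hga a h
      · exact ⟨hrel.1, Relation.ReflTransGen.tail (hga p hp).2 hrel⟩
  have hmono : ∀ k, ∀ a ∈ T k, a ∈ T (k + 1) := by
    intro k a ha
    rw [hTs]
    exact (pvStep_mem m vis _ _).mpr (Or.inl ha)
  have hmono' : ∀ j k, j ≤ k → ∀ a ∈ T j, a ∈ T k := by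
    intro j k hjk
    induction hjk with
    | refl => exact fun a ha => ha
    | step _ ih => exact fun a ha => hmono _ a (ih a ha)
  -- some level below 25 is already a fixpoint
  have hfix : ∃ k ≤ 24, ∀ a, a ∈ T (k + 1) ↔ a ∈ T k := by
    by_contra hno
    push_neg at hno
    have hcard : ∀ j, j ≤ 25 → j + 1 ≤ (T j).toFinset.card := by
      intro j
      induction j with
      | zero =>
        intro _
        have := (hprops 0).2.2
        have : c ∈ (T 0).toFinset := List.mem_toFinset.mpr this
        have := Finset.card_pos.mpr ⟨c, this⟩
        omega
      | succ j ihj =>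
        intro hj
        obtain ⟨a, hane⟩ := hno j (by omega)
        have ha1 : a ∈ T (j + 1) ∧ a ∉ T j := by
          rcases hane with h | ⟨h1, h2⟩
          · exact h
          · exact absurd (hmono j a h2) h1
        have hsub : (T j).toFinset ⊂ (T (j + 1)).toFinset := by
          constructor
          · intro b hb
            exact List.mem_toFinset.mpr (hmono j b (List.mem_toFinset.mp hb))
          · intro hcontra
            exact ha1.2 (List.mem_toFinset.mp (hcontra (List.mem_toFinset.mpr ha1.1)))
        have := Finset.card_lt_card hsub
        have := ihj (by omega)
        omega
    have h26 := hcard 25 (le_refl 25)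
    have hsub : (T 25).toFinset ⊆ pvAllCells.toFinset := by
      intro b hb
      exact List.mem_toFinset.mpr
        (pv_mem_allCells b ((hprops 25).2.1 b (List.mem_toFinset.mp hb)).1)
    have hle := Finset.card_le_card hsub
    have h25 : pvAllCells.toFinset.card = 25 := by decide
    omega
  obtain ⟨k, hk24, hkfix⟩ := hfix
  -- the fixpoint propagates up to 25
  have hprop : ∀ j, k ≤ j → ∀ a, a ∈ T j ↔ a ∈ T k := by
    intro j hj
    induction hj with
    | refl => exact fun a => Iff.rfl
    | step hle ih =>
      intro a
      rw [hTs]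
      constructor
      · intro ha
        rcases (pvStep_mem m vis _ _).mp ha with h | ⟨p, hp, hrel⟩
        · exact (ih a).mp h
        · exact (hkfix a).mp (by
            rw [hTs]
            exact (pvStep_mem m vis _ _).mpr (Or.inr ⟨p, (ih p).mp hp, hrel⟩))
      · intro ha
        exact (pvStep_mem m vis _ _).mpr (Or.inl ((ih a).mpr ha))
  have hclosed : ∀ a ∈ T 25, ∀ q, PvRel m vis a q → q ∈ T 25 := by
    intro a ha q hrel
    have hak : a ∈ T k := (hprop 25 (by omega) a).mp ha
    have : q ∈ T (k + 1) := by
      rw [hTs]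
      exact (pvStep_mem m vis _ _).mpr (Or.inr ⟨a, hak, hrel⟩)
    have : q ∈ T k := (hkfix q).mp this
    exact (hprop 25 (by omega) q).mpr this
  rw [hiter]
  refine ⟨fun a => ⟨fun ha => ((hprops 25).2.1 a ha).2, fun ha => ?_⟩, (hprops 25).1⟩
  induction ha with
  | refl => exact (hprops 25).2.2
  | tail hr hrel ihr => exact hclosed _ ihr _ hrel

-- ---- clearing the same set of cells yields the same matrix ----
theorem pvSet0_comm (row : List Int) (a b : Nat) :
    (row.set a 0).set b 0 = (row.set b 0).set a 0 := by
  by_cases h : a = b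
  · subst h; simp [List.set_set]
  · exact List.set_comm _ _ (fun hc => h hc)

theorem pvClearOne_comm (m : List (List Int)) (c d : Int × Int) :
    (m.modify c.1.toNat (fun row => row.set c.2.toNat 0)).modify
        d.1.toNat (fun row => row.set d.2.toNat 0) =
      (m.modify d.1.toNat (fun row => row.set d.2.toNat 0)).modify
        c.1.toNat (fun row => row.set c.2.toNat 0) := by
  apply List.ext_getElem
  · simp
  · intro i hi1 hi2
    simp only [List.getElem_modify] at *
    by_cases h1 : c.1.toNat = i <;> by_cases h2 : d.1.toNat = i <;>
      simp [h1, h2, pvSet0_comm]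

theorem pvClear_perm (m : List (List Int)) (l1 l2 : List (Int × Int)) (h : l1.Perm l2) :
    pvClear m l1 = pvClear m l2 := by
  unfold pvClear
  induction h generalizing m with
  | nil => rfl
  | cons x _ ih => simp only [List.foldl_cons]; exact ih _
  | swap x y l =>
    simp only [List.foldl_cons]
    rw [pvClearOne_comm]
  | trans _ _ ih1 ih2 => rw [ih1 m, ih2 m]

-- ---- the per-cell steps agree ----
def PvInv (sA sB : PVOut) : Prop :=
  sA.1 = sB.1 ∧ (∀ a, a ∈ sA.2.1 ↔ a ∈ sB.2.1) ∧ sA.2.1.Nodup ∧ sB.2.1.Nodup ∧ sA.2.2 = sB.2.2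

set_option maxHeartbeats 400000 in
theorem pvInner_eq (flag : Bool) (i : Int) (sA sB : PVOut) (j : Int)
    (hi : 0 ≤ i ∧ i < 5) (hj : 0 ≤ j ∧ j < 5) (h : PvInv sA sB) :
    PvInv (pvInnerA flag i sA j) (pvInnerB flag i sB j) := by
  obtain ⟨mA, vA, rA⟩ := sA
  obtain ⟨mB, vB, rB⟩ := sB
  obtain ⟨hm, hv, hnA, hnB, hr⟩ := h
  dsimp only at hm hv hnA hnB hr
  subst hm hr
  unfold pvInnerA pvInnerB
  dsimp only
  by_cases hmem : (i, j) ∈ vA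
  · rw [if_pos hmem, if_pos ((hv _).mp hmem)]
    exact ⟨rfl, hv, hnA, hnB, rfl⟩
  · rw [if_neg hmem, if_neg (fun hb => hmem ((hv _).mpr hb))]
    have hadd : PySem.Set.add (PySem.Set.empty : PySem.Set (Int × Int)) (i, j) = [(i, j)] := by
      rw [PySem.Set.add_of_not_mem (by simp [PySem.Set.empty])]
      simp [PySem.Set.empty]
    obtain ⟨a1, a2, a3, a4, a5⟩ :=
      pvBfsLoop_spec mA vA (i, j)
        (pvMeasure (PySem.Set.add vA (i, j)) [(i, j)]) [(i, j)]
        (PySem.Set.add PySem.Set.empty (i, j)) (PySem.Set.add vA (i, j)) 1 rfl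
        (by rw [hadd]; exact List.mem_singleton.mpr rfl)
        (by intro a ha; rw [hadd]; simpa using ha)
        (by intro a; rw [hadd, PySem.Set.mem_add _ _ _]; simp)
        (by intro a ha; rw [hadd] at ha
            rcases List.mem_singleton.mp ha with rfl
            exact Relation.ReflTransGen.refl)
        (by intro a ha hnq; rw [hadd] at ha
            rcases List.mem_singleton.mp ha with rfl
            exact (hnq (List.mem_singleton.mpr rfl)).elim)
        (by rw [hadd]; exact List.nodup_singleton _)
        (PySem.Set.nodup_add _ _ hnA)
        (by rw [hadd]; simp)
    obtain ⟨b1, b2⟩ := pvSat_spec mA vB (i, j) ⟨hi.1, hi.2, hj.1, hj.2⟩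
    have hmm : ∀ a,
        a ∈ (pvBfsLoop mA (PySem.Set.add PySem.Set.empty (i, j))
          (PySem.Set.add vA (i, j)) 1 [(i, j)]).1 ↔
        a ∈ pvSat mA vB (PySem.Set.add PySem.Set.empty (i, j)) := by
      intro a
      rw [a1 a, b1 a]
      exact ⟨pvReach_congr mA vA vB hv _ _, pvReach_congr mA vB vA (fun x => (hv x).symm) _ _⟩
    have hperm : (pvBfsLoop mA (PySem.Set.add PySem.Set.empty (i, j))
        (PySem.Set.add vA (i, j)) 1 [(i, j)]).1.Perm
          (pvSat mA vB (PySem.Set.add PySem.Set.empty (i, j))) :=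
      (List.perm_ext_iff_of_nodup a3 b2).mpr hmm
    have hlen : (pvBfsLoop mA (PySem.Set.add PySem.Set.empty (i, j))
        (PySem.Set.add vA (i, j)) 1 [(i, j)]).2.2 =
        PySem.Set.len (pvSat mA vB (PySem.Set.add PySem.Set.empty (i, j))) := by
      rw [a5, PySem.Set.len_eq, hperm.length_eq]
    unfold pvBfs
    dsimp only
    set L := pvBfsLoop mA (PySem.Set.add PySem.Set.empty (i, j))
      (PySem.Set.add vA (i, j)) 1 [(i, j)] with hLdef
    set C := pvSat mA vB (PySem.Set.add PySem.Set.empty (i, j)) with hCdef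
    rw [hlen]
    by_cases hc3 : 3 ≤ PySem.Set.len C
    · simp only [if_pos hc3]
      unfold PvInv
      refine ⟨?_, ?_, ?_, ?_, ?_⟩
      · dsimp only
        cases flag
        · simp
        · exact pvClear_perm mA _ _ hperm
      · intro a
        dsimp only
        rw [a2 a, PySem.Set.mem_union, hv a, hmm a]
      · dsimp only
        exact a4
      · dsimp only
        exact PySem.Set.nodup_union _ _ hnB
      · dsimp only
    · simp only [if_neg hc3]
      unfold PvInv
      refine ⟨rfl, ?_, by dsimp only; exact a4,
        by dsimp only; exact PySem.Set.nodup_union _ _ hnB, by dsimp only; omega⟩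
      intro a
      dsimp only
      rw [a2 a, PySem.Set.mem_union, hv a, hmm a]

theorem pvFold_eq (flag : Bool) :
    ∀ (I : List Int), (∀ i ∈ I, 0 ≤ i ∧ i < 5) → ∀ sA sB, PvInv sA sB →
      PvInv (I.foldl (pvOuterA flag) sA) (I.foldl (pvOuterB flag) sB) := by
  have hinner : ∀ (i : Int), 0 ≤ i ∧ i < 5 → ∀ (J : List Int), (∀ j ∈ J, 0 ≤ j ∧ j < 5) →
      ∀ sA sB, PvInv sA sB →
        PvInv (J.foldl (pvInnerA flag i) sA) (J.foldl (pvInnerB flag i) sB) := by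
    intro i hi J
    induction J with
    | nil => intro _ sA sB h; exact h
    | cons j J ih =>
      intro hJ sA sB h
      rw [List.foldl_cons, List.foldl_cons]
      exact ih (fun x hx => hJ x (List.mem_cons_of_mem _ hx)) _ _
        (pvInner_eq flag i sA sB j hi (hJ j List.mem_cons_self) h)
  intro I
  induction I with
  | nil => intro _ sA sB h; exact h
  | cons i I ih =>
    intro hI sA sB h
    rw [List.foldl_cons, List.foldl_cons]
    refine ih (fun x hx => hI x (List.mem_cons_of_mem _ hx)) _ _ ?_
    unfold pvOuterA pvOuterB
    exact hinner i (hI i List.mem_cons_self) _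
      (fun j hj => by rw [PySem.List.mem_pyRange_one] at hj; omega) _ _ h

-- ===== VERDICT (by name: the statement is the Claim_ definition above) =====
theorem chk_matrix_spec : Claim_equal_chk_matrix := by
  intro matrix flag _ _
  unfold Spec_chk_matrix chk_matrix chk_matrix_alt
  have h := pvFold_eq flag (PySem.List.pyRange 0 5 1)
    (fun i hi => by rw [PySem.List.mem_pyRange_one] at hi; omega)
    (matrix, PySem.Set.empty, (0 : Int)) (matrix, PySem.Set.empty, (0 : Int))
    ⟨rfl, fun a => Iff.rfl, List.nodup_nil, List.nodup_nil, rfl⟩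
  exact h.2.2.2.2
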